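-- pv_equiv track=rewrite | github.com/JanhaveeSingh/UBS_Team-Untitled | routes/micromouse.py | _simulate_brake_momentum
-- ===== SOURCE A (Python) =====
-- def _simulate_brake_momentum(momentum: int, brake_count: int) -> int:
--     m = momentum
--     for _ in range(brake_count):
--         if m > 0:
--             m = max(0, m - 2)
--         elif m < 0:
--             m = min(0, m + 2)
--     return m
-- ===== SOURCE B (Python) =====
-- def _simulate_brake_momentum(momentum: int, brake_count: int) -> int:
--     # work on the magnitude: braking removes 2 per step, saturating at 0
--     mag = abs(momentum) - 2 * max(brake_count, 0)
--     if mag < 0: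
--         mag = 0
--     return -mag if momentum < 0 else mag
-- ===== Notes on version B (the rewrite author's own statement) =====
-- stated objective: faster
-- what changed: Replaces the O(brake_count) per-step decay loop with an O(1) computation on the magnitude: subtract 2*max(brake_count,0) from abs(momentum), clamp at 0, and restore the sign.
import Mathlib
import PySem

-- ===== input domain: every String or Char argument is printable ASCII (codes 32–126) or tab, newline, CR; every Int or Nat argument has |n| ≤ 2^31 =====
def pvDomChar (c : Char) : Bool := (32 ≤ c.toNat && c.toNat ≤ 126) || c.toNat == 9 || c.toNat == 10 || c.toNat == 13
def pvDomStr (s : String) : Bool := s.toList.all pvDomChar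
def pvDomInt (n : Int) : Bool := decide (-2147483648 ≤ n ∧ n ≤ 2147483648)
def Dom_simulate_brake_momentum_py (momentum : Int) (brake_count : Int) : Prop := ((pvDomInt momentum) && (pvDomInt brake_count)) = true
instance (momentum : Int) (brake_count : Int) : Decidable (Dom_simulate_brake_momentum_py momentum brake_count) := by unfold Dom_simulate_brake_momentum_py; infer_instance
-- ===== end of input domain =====

-- B replaces A's O(brake_count) decay loop by an O(1) magnitude computation; return values are identical.

-- ===== PORT A =====
-- literal port of A: fold the per-step brake update over range(brake_count)
def simulate_brake_momentum_py (momentum : Int) (brake_count : Int) : Int :=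
  (PySem.List.pyRange 0 brake_count 1).foldl
    (fun m _ => if m > 0 then max 0 (m - 2) else if m < 0 then min 0 (m + 2) else m)
    momentum

-- ===== PORT B =====
-- port of B: subtract 2*max(brake_count,0) from the magnitude, clamp at 0, restore the sign
def simulate_brake_momentum_py_alt (momentum : Int) (brake_count : Int) : Int :=
  let mag0 := |momentum| - 2 * max brake_count 0
  let mag := if mag0 < 0 then 0 else mag0
  if momentum < 0 then -mag else mag

-- ===== PRECONDITION & SPEC =====
def Spec_simulate_brake_momentum_py (momentum : Int) (brake_count : Int) (out : Int) : Prop := out = simulate_brake_momentum_py_alt momentum brake_count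
instance (momentum : Int) (brake_count : Int) (out : Int) : Decidable (Spec_simulate_brake_momentum_py momentum brake_count out) := by unfold Spec_simulate_brake_momentum_py; infer_instance

-- ===== CLAIM (what is proved, stated in full; the proofs are below) =====
def Claim_equal_simulate_brake_momentum_py : Prop := ∀ (momentum : Int) (brake_count : Int), Dom_simulate_brake_momentum_py momentum brake_count → Spec_simulate_brake_momentum_py momentum brake_count (simulate_brake_momentum_py momentum brake_count)

-- ===== LEMMAS AND PROOFS =====

-- the fold ignores the list elements, so it only depends on the list length
def pvBrakeN : Nat → Int → Int
  | 0, m => m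
  | n + 1, m => pvBrakeN n (if m > 0 then max 0 (m - 2) else if m < 0 then min 0 (m + 2) else m)

theorem pvFoldl_eq_brakeN (l : List Int) (m : Int) :
    l.foldl (fun m _ => if m > 0 then max 0 (m - 2) else if m < 0 then min 0 (m + 2) else m) m
      = pvBrakeN l.length m := by
  induction l generalizing m with
  | nil => rfl
  | cons a t ih => simp [List.foldl, pvBrakeN, ih]

theorem pvBrakeN_closed (n : Nat) (m : Int) :
    pvBrakeN n m =
      (if m > 0 then max 0 (m - 2 * n) else if m < 0 then min 0 (m + 2 * n) else m) := by
  induction n generalizing m with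
  | zero => simp [pvBrakeN]; split_ifs <;> omega
  | succ n ih =>
    rw [pvBrakeN, ih]
    push_cast
    split_ifs <;> omega

-- ===== VERDICT (by name: the statement is the Claim_ definition above) =====
theorem simulate_brake_momentum_py_spec : Claim_equal_simulate_brake_momentum_py := by
  intro momentum brake_count _
  unfold Spec_simulate_brake_momentum_py simulate_brake_momentum_py simulate_brake_momentum_py_alt
  rw [pvFoldl_eq_brakeN, pvBrakeN_closed, PySem.List.length_pyRange_one]
  have h : ((brake_count - 0).toNat : Int) = max brake_count 0 := by omega
  rw [h]
  dsimp only []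
  rcases abs_cases momentum with ⟨ha, _⟩ | ⟨ha, _⟩ <;> rw [ha] <;> split_ifs <;> omega
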